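-- pv_equiv track=rewrite | github.com/gangslee/Coding-Test | 기타/200913 라인/공뽑기.py | solution
-- ===== SOURCE A (Python) =====
-- def solution(ball, order):
--     from collections import deque
--     ball = deque(ball)
--     order = deque(order)
--     answer = deque([])
--     temp = deque([])
--
--     while len(ball) > 0:
--         if order[0] == ball[0] or order[0] == ball[len(ball)-1]:
--             if order[0] == ball[0]:
--                 ball.popleft()
--
--             elif order[0] == ball[len(ball)-1]:
--                 ball.pop()
--
--             answer.append(order.popleft())
--
--             if len(temp) > 0:
--                 temp.reverse()
--                 order.extendleft(temp)
--                 temp.clear()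
--         else:
--             temp.append(order.popleft())
--
--     return list(answer)
-- ===== SOURCE B (Python) =====
-- def solution(ball, order):
--     # first-occurrence index of each value in order
--     idx = {}
--     for i, v in enumerate(order):
--         if v not in idx:
--             idx[v] = i
--     answer = []
--     l, r = 0, len(ball) - 1
--     while l <= r:
--         if idx[ball[l]] <= idx[ball[r]]:
--             answer.append(ball[l])
--             l += 1
--         else:
--             answer.append(ball[r])
--             r -= 1
--     return answer
-- ===== Notes on version B (the rewrite author's own statement) =====
-- stated objective: faster
-- what changed: Replaced A's deque simulation (which repeatedly scans the pending order via a temp deque and requeues it after every removal) by a precomputed first-occurrence-index dict over order plus a single two-pointer pass over ball that removes whichever end has the smaller order index.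
-- outside the precondition, e.g. on solution([1, 3, 1], [1, 3, 1]): A returns [1, 3, 1], B returns [1, 1, 3]
import Mathlib
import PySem

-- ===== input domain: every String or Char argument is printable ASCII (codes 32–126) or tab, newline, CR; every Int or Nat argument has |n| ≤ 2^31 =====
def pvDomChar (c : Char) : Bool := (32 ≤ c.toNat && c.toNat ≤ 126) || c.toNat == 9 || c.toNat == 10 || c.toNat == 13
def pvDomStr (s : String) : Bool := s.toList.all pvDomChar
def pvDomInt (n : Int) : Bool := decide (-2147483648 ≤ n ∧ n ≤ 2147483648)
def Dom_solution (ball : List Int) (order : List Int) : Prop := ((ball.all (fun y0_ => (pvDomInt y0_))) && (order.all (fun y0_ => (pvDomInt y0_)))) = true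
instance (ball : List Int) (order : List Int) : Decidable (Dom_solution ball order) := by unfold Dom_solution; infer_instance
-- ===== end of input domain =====

-- B replaces A's deque simulation (temp requeue scan after every removal) by a precomputed
-- first-occurrence-index dict over `order` plus a single two-pointer pass over `ball`
-- removing the end with the smaller order index (objective: faster).

-- ===== PORT A =====
-- the while-loop of A as structural recursion over its state (ball, order, temp, answer)
def solutionLoop (ball order temp answer : List Int) : List Int :=
  match ball, order with
  | [], _ => answer
  | _ :: _, [] => answer        -- Python raises IndexError on order[0] here; excluded by Pre_solution
  | b :: bs, o :: os =>
    if h : o = b ∨ o = (b :: bs).getLast (by simp) then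
      if o = b then
        -- popleft; answer.append; temp.reverse + order.extendleft = temp restored in order at the front
        solutionLoop bs (temp ++ os) [] (answer ++ [o])
      else
        -- o == ball[len(ball)-1]: pop
        solutionLoop ((b :: bs).dropLast) (temp ++ os) [] (answer ++ [o])
    else
      solutionLoop (b :: bs) os (temp ++ [o]) answer
termination_by (ball.length, order.length)
decreasing_by
  · simp; omega
  · simp [List.length_dropLast]; omega
  · simp; omega

def solution (ball : List Int) (order : List Int) : List Int :=
  solutionLoop ball order [] []

-- ===== PORT B =====
-- idx = {}; for i, v in enumerate(order): if v not in idx: idx[v] = i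
def buildIdx (order : List Int) : PySem.Dict Int Int :=
  (PySem.List.enumerate order).foldl
    (fun d p => if d.contains p.2 then d else d.insert p.2 p.1) PySem.Dict.empty

-- the two-pointer while-loop of B; dict lookup with default 0 (Python raises KeyError
-- only on inputs excluded by Pre_solution)
def altLoop (ball : List Int) (idx : PySem.Dict Int Int) (l r : Int) (answer : List Int) :
    List Int :=
  if _h : l ≤ r then
    let bl := PySem.List.pyGetD ball l 0
    let br := PySem.List.pyGetD ball r 0
    if idx.getD bl 0 ≤ idx.getD br 0 then
      altLoop ball idx (l + 1) r (answer ++ [bl])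
    else
      altLoop ball idx l (r - 1) (answer ++ [br])
  else answer
termination_by (r + 1 - l).toNat
decreasing_by
  · omega
  · omega

def solution_alt (ball : List Int) (order : List Int) : List Int :=
  altLoop ball (buildIdx order) 0 (PySem.List.len ball - 1) []

-- ===== PRECONDITION & SPEC =====
-- Pre_ excludes balls with duplicate values (there A's answer order is an artefact of its
-- scan and differs from the two-pointer rule) and inputs where some ball value is absent
-- from order (there A raises IndexError after draining order, and B raises KeyError).
def Pre_solution (ball : List Int) (order : List Int) : Prop :=
  ball.Nodup ∧ ∀ x ∈ ball, x ∈ order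
instance (ball : List Int) (order : List Int) : Decidable (Pre_solution ball order) := by
  unfold Pre_solution; infer_instance

def pvWitness_solution : List Int × List Int := ([1, 2, 3], [2, 3, 1])

def Spec_solution (ball : List Int) (order : List Int) (out : List Int) : Prop :=
  out = solution_alt ball order
instance (ball : List Int) (order : List Int) (out : List Int) :
    Decidable (Spec_solution ball order out) := by unfold Spec_solution; infer_instance

-- ===== CLAIM (what is proved, stated in full; the proofs are below) =====
def Claim_equal_solution : Prop := ∀ (ball : List Int) (order : List Int),
  Dom_solution ball order → Pre_solution ball order →
  Spec_solution ball order (solution ball order)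

-- ===== LEMMAS AND PROOFS =====

-- reference scan: the first element of pending equal to front or back, with the rest of pending
def pick (front back : Int) : List Int → Option (Int × List Int)
  | [] => none
  | p :: ps =>
    if p = front ∨ p = back then some (p, ps)
    else (pick front back ps).map (fun q => (q.1, p :: q.2))

-- reference semantics of A: repeatedly remove the first pending match at an end
def ff : List Int → List Int → List Int
  | [], _ => []
  | b :: bs, pending =>
    match pick b ((b :: bs).getLast (by simp)) pending with
    | none => []
    | some (v, rest) =>
      if v = b then v :: ff bs rest
      else v :: ff ((b :: bs).dropLast) rest
termination_by w _ => w.length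
decreasing_by
  · simp
  · simp [List.length_dropLast]

-- reference semantics of B: structural two-ended recursion on the window
def gg (idx : PySem.Dict Int Int) : List Int → List Int
  | [] => []
  | b :: bs =>
    if idx.getD b 0 ≤ idx.getD ((b :: bs).getLast (by simp)) 0 then
      b :: gg idx bs
    else
      (b :: bs).getLast (by simp) :: gg idx ((b :: bs).dropLast)
termination_by w => w.length
decreasing_by
  · simp
  · simp [List.length_dropLast]

lemma pick_append_skip (front back : Int) (temp rest : List Int)
    (h : ∀ t ∈ temp, ¬(t = front ∨ t = back)) :
    pick front back (temp ++ rest) =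
      (pick front back rest).map (fun q => (q.1, temp ++ q.2)) := by
  induction temp with
  | nil => simp
  | cons p ps ih =>
    have hp := h p (by simp)
    simp only [List.cons_append, pick, if_neg hp, ih (fun t ht => h t (by simp [ht])),
      Option.map_map]
    rfl

lemma loop_eq_ff (ball order temp answer : List Int)
    (h : ∀ t ∈ temp, ∀ b bs, ball = b :: bs →
        ¬(t = b ∨ t = (b :: bs).getLast (by simp))) :
    solutionLoop ball order temp answer = answer ++ ff ball (temp ++ order) := by
  induction ball, order, temp, answer using solutionLoop.induct with
  | case1 order temp answer => simp [solutionLoop, ff]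
  | case2 temp answer b bs =>
    have hpick : pick b ((b :: bs).getLast (by simp)) (temp ++ []) = none := by
      rw [pick_append_skip _ _ _ _ (fun t ht => h t ht b bs rfl)]
      simp [pick]
    simp only [solutionLoop, ff, hpick]
    simp
  | case3 temp answer bs o os hor ih =>
    have hpick : pick o ((o :: bs).getLast (by simp)) (temp ++ o :: os) =
        some (o, temp ++ os) := by
      rw [pick_append_skip _ _ _ _ (fun t ht => h t ht o bs rfl)]
      simp [pick]
    simp only [solutionLoop]
    rw [ih (by simp)]
    simp only [ff, hpick, List.nil_append, List.append_assoc, List.singleton_append]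
    simp
  | case4 temp answer b bs o os hor hob ih =>
    have hpick : pick b ((b :: bs).getLast (by simp)) (temp ++ o :: os) =
        some (o, temp ++ os) := by
      rw [pick_append_skip _ _ _ _ (fun t ht => h t ht b bs rfl)]
      simp [pick, hor]
    simp only [solutionLoop, dif_pos hor, if_neg hob]
    rw [ih (by simp)]
    simp only [ff, hpick, if_neg hob, List.nil_append, List.append_assoc,
      List.singleton_append]
  | case5 temp answer b bs o os hor ih =>
    simp only [solutionLoop, dif_neg hor]
    rw [ih]
    · simp
    · intro t ht b' bs' he
      injection he with h1 h2
      subst h1; subst h2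
      rcases List.mem_append.mp ht with h1 | h2
      · exact h t h1 b bs rfl
      · simp at h2; subst h2; exact hor

lemma idxOf_cons_ne' (p front : Int) (ps : List Int) (h : p ≠ front) :
    (p :: ps).idxOf front = ps.idxOf front + 1 := by
  simp [h]
lemma idxOf_ne_idxOf {l : List Int} {x y : Int} (hx : x ∈ l) (hxy : x ≠ y) :
    l.idxOf x ≠ l.idxOf y := by
  intro he
  have h1 : l.idxOf x < l.length := List.idxOf_lt_length_of_mem hx
  have h2 : l.idxOf y < l.length := by omega
  apply hxy
  calc x = l[l.idxOf x] := (List.getElem_idxOf h1).symm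
    _ = l[l.idxOf y] := by simp [he]
    _ = y := List.getElem_idxOf h2
lemma idxOf_erase_char (pending : List Int) (v x : Int)
    (hv : v ∈ pending) (hx : x ∈ pending) (hxv : x ≠ v) :
    (pending.erase v).idxOf x =
      if pending.idxOf x < pending.idxOf v then pending.idxOf x
      else pending.idxOf x - 1 := by
  induction pending with
  | nil => simp at hv
  | cons p ps ih =>
    by_cases hpv : p = v
    · subst hpv
      have hx' : x ∈ ps := (List.mem_cons.mp hx).resolve_left hxv
      simp [idxOf_cons_ne' _ _ _ (fun h => hxv h.symm), List.idxOf_cons_self]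
    · have hv' : v ∈ ps := (List.mem_cons.mp hv).resolve_left (fun h => hpv h.symm)
      rw [List.erase_cons_tail (by simp [hpv])]
      by_cases hxp : x = p
      · subst hxp
        simp [List.idxOf_cons_self, idxOf_cons_ne' _ _ _ hpv]
      · have hx' : x ∈ ps := (List.mem_cons.mp hx).resolve_left hxp
        have hne := idxOf_ne_idxOf hx' hxv
        rw [idxOf_cons_ne' _ _ _ (fun h => hxp h.symm),
          idxOf_cons_ne' _ _ _ (fun h => hxp h.symm),
          idxOf_cons_ne' _ _ _ hpv, ih hv' hx']
        split_ifs <;> omega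
lemma idxOf_erase_lt_iff (pending : List Int) (v x y : Int)
    (hv : v ∈ pending) (hx : x ∈ pending) (hy : y ∈ pending)
    (hxv : x ≠ v) (hyv : y ≠ v) :
    ((pending.erase v).idxOf x < (pending.erase v).idxOf y ↔
      pending.idxOf x < pending.idxOf y) := by
  rw [idxOf_erase_char pending v x hv hx hxv, idxOf_erase_char pending v y hv hy hyv]
  have h1 := idxOf_ne_idxOf hx hxv
  have h2 := idxOf_ne_idxOf hy hyv
  split_ifs <;> omega
lemma pick_spec (front back : Int) (pending : List Int)
    (hf : front ∈ pending) (hb : back ∈ pending) :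
    pick front back pending =
      if pending.idxOf front ≤ pending.idxOf back
      then some (front, pending.erase front)
      else some (back, pending.erase back) := by
  induction pending with
  | nil => simp at hf
  | cons p ps ih =>
    by_cases hpf : p = front
    · subst hpf
      simp [pick]
    · have hf' : front ∈ ps := (List.mem_cons.mp hf).resolve_left (fun h => hpf h.symm)
      by_cases hpb : p = back
      · subst hpb
        rw [idxOf_cons_ne' _ _ _ hpf]
        simp [pick, List.idxOf_cons_self]
      · have hb' : back ∈ ps := (List.mem_cons.mp hb).resolve_left (fun h => hpb h.symm)
        simp only [pick, ih hf' hb', idxOf_cons_ne' _ _ _ hpf, idxOf_cons_ne' _ _ _ hpb,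
          List.erase_cons, beq_iff_eq, hpf, hpb]
        split_ifs with h1 h2 h3 <;> simp_all
        omega

lemma ff_eq_gg (idx : PySem.Dict Int Int) (window pending : List Int)
    (hnd : window.Nodup)
    (hmem : ∀ x ∈ window, x ∈ pending)
    (hord : ∀ x ∈ window, ∀ y ∈ window,
      (pending.idxOf x < pending.idxOf y ↔ idx.getD x 0 < idx.getD y 0)) :
    ff window pending = gg idx window := by
  induction window, pending using ff.induct with
  | case1 pending => simp [ff, gg]
  | case2 b bs pending hpick =>
    exfalso
    rw [pick_spec _ _ _ (hmem b (by simp)) (hmem _ (List.getLast_mem _))] at hpick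
    split_ifs at hpick
  | case3 bs pending v rest hpick ih =>
    have hvp : v ∈ pending := hmem v (by simp)
    have hep : (v :: bs).getLast (by simp) ∈ pending := hmem _ (List.getLast_mem _)
    have hspec := hpick
    rw [pick_spec _ _ _ hvp hep] at hspec
    have hrest : rest = pending.erase v ∧
        pending.idxOf v ≤ pending.idxOf ((v :: bs).getLast (by simp)) := by
      split_ifs at hspec with hle
      · simp only [Option.some.injEq, Prod.mk.injEq] at hspec
        exact ⟨hspec.2.symm, hle⟩
      · simp only [Option.some.injEq, Prod.mk.injEq] at hspec
        rw [hspec.1] at hle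
        exact (hle (le_refl _)).elim
    obtain ⟨hr, hle⟩ := hrest
    have hgle : idx.getD v 0 ≤ idx.getD ((v :: bs).getLast (by simp)) 0 := by
      rcases eq_or_ne bs [] with rfl | hbs
      · simp
      · have hve : v ≠ (v :: bs).getLast (by simp) := by
          rw [List.getLast_cons hbs]
          intro he
          exact (List.nodup_cons.mp hnd).1 (he ▸ List.getLast_mem hbs)
        have hlt : pending.idxOf v < pending.idxOf ((v :: bs).getLast (by simp)) :=
          lt_of_le_of_ne hle (idxOf_ne_idxOf hvp hve)
        exact le_of_lt ((hord v (by simp) _ (List.getLast_mem _)).mp hlt)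
    have hbody : ff bs rest = gg idx bs := by
      have hnd' := (List.nodup_cons.mp hnd).2
      have hnv := (List.nodup_cons.mp hnd).1
      apply ih hnd'
      · intro x hx
        rw [hr]
        exact (List.mem_erase_of_ne (fun he => hnv (by rwa [he] at hx))).mpr (hmem x (by simp [hx]))
      · intro x hx y hy
        rw [hr, idxOf_erase_lt_iff pending v x y hvp (hmem x (by simp [hx]))
          (hmem y (by simp [hy])) (fun he => hnv (by rwa [he] at hx)) (fun he => hnv (by rwa [he] at hy))]
        exact hord x (by simp [hx]) y (by simp [hy])
    show ff (v :: bs) pending = gg idx (v :: bs)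
    rw [ff, gg]
    simp [hpick, hgle, hbody]
  | case4 b bs pending v rest hpick hvb ih =>
    have hbp : b ∈ pending := hmem b (by simp)
    have hep : (b :: bs).getLast (by simp) ∈ pending := hmem _ (List.getLast_mem _)
    have hspec := hpick
    rw [pick_spec _ _ _ hbp hep] at hspec
    have hkey : v = (b :: bs).getLast (by simp) ∧
        rest = pending.erase ((b :: bs).getLast (by simp)) ∧
        pending.idxOf ((b :: bs).getLast (by simp)) < pending.idxOf b := by
      split_ifs at hspec with hle
      · simp only [Option.some.injEq, Prod.mk.injEq] at hspec
        exact absurd hspec.1.symm hvb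
      · simp only [Option.some.injEq, Prod.mk.injEq] at hspec
        exact ⟨hspec.1.symm, hspec.2.symm, by omega⟩
    obtain ⟨hv, hr, hlt⟩ := hkey
    have hbe : b ≠ (b :: bs).getLast (by simp) := fun he => hvb (hv.trans he.symm)
    have hglt : ¬ (idx.getD b 0 ≤ idx.getD ((b :: bs).getLast (by simp)) 0) := by
      have := (hord _ (List.getLast_mem _) b (by simp)).mp hlt
      omega
    have hnd' : ((b :: bs).dropLast).Nodup := hnd.sublist (List.dropLast_sublist _)
    have hnotin : (b :: bs).getLast (by simp) ∉ (b :: bs).dropLast := by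
      have hperm := List.dropLast_append_getLast (l := b :: bs) (by simp)
      have := hnd
      rw [← hperm] at this
      have := List.disjoint_of_nodup_append this
      intro hmem'
      exact this hmem' (by simp)
    have hbody : ff ((b :: bs).dropLast) rest = gg idx ((b :: bs).dropLast) := by
      apply ih hnd'
      · intro x hx
        rw [hr]
        exact (List.mem_erase_of_ne (fun he => hnotin (by rwa [he] at hx))).mpr
          (hmem x ((List.dropLast_sublist _).subset hx))
      · intro x hx y hy
        rw [hr, idxOf_erase_lt_iff pending _ x y hep
          (hmem x ((List.dropLast_sublist _).subset hx))
          (hmem y ((List.dropLast_sublist _).subset hy))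
          (fun he => hnotin (by rwa [he] at hx)) (fun he => hnotin (by rwa [he] at hy))]
        exact hord x ((List.dropLast_sublist _).subset hx) y ((List.dropLast_sublist _).subset hy)
    show ff (b :: bs) pending = gg idx (b :: bs)
    rw [ff, gg]
    simp [hpick, hglt, hbody, hv, Ne.symm hbe]

lemma buildIdx_mono (l : List (Int × Int)) (d : PySem.Dict Int Int) (x v : Int)
    (h : d.get? x = some v) :
    (l.foldl (fun d p => if d.contains p.2 then d else d.insert p.2 p.1) d).get? x = some v := by
  induction l generalizing d with
  | nil => exact h
  | cons p ps ih =>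
    simp only [List.foldl_cons]
    apply ih
    split_ifs with hc
    · exact h
    · rcases eq_or_ne x p.2 with rfl | hne
      · rw [PySem.Dict.contains_eq_isSome_get?, h] at hc
        simp at hc
      · rw [PySem.Dict.get?_insert_of_ne _ _ hne]
        exact h

lemma buildIdx_aux (l : List Int) : ∀ (s : Int) (d : PySem.Dict Int Int) (x : Int),
    x ∈ l → d.get? x = none →
    ((PySem.List.enumerate l s).foldl
      (fun d p => if d.contains p.2 then d else d.insert p.2 p.1) d).get? x
      = some (s + l.idxOf x) := by
  induction l with
  | nil => intro s d x hx; simp at hx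
  | cons h t ih =>
    intro s d x hx hd
    rw [PySem.List.enumerate_cons]
    simp only [List.foldl_cons]
    rcases eq_or_ne x h with rfl | hne
    · have hc : d.contains x = false := by
        rw [PySem.Dict.contains_eq_isSome_get?, hd]; rfl
      rw [if_neg (by simp [hc])]
      rw [buildIdx_mono _ _ _ _ (PySem.Dict.get?_insert_self _ _ _)]
      simp [List.idxOf_cons_self]
    · have hx' : x ∈ t := (List.mem_cons.mp hx).resolve_left hne
      have hd' : (if d.contains h then d else d.insert h s).get? x = none := by
        split_ifs
        · exact hd
        · rw [PySem.Dict.get?_insert_of_ne _ _ hne]; exact hd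
      rw [ih (s + 1) _ x hx' hd']
      have : (h :: t).idxOf x = t.idxOf x + 1 := by simp [Ne.symm hne]
      rw [this]
      push_cast
      congr 1
      omega

lemma buildIdx_getD (order : List Int) (x : Int) (hx : x ∈ order) :
    (buildIdx order).getD x 0 = (order.idxOf x : Int) := by
  unfold buildIdx
  rw [PySem.Dict.getD_eq_get?_getD, buildIdx_aux order 0 _ x hx (by simp [PySem.Dict.get?_empty])]
  simp

lemma getLast_congr' (l m : List Int) (hl : l ≠ []) (hm : m ≠ []) (h : l = m) :
    l.getLast hl = m.getLast hm := by subst h; rfl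

lemma altLoop_eq (ball : List Int) (idx : PySem.Dict Int Int) :
    ∀ (k a b : Nat) (answer : List Int), a + k = b → b ≤ ball.length →
    altLoop ball idx (a : Int) ((b : Int) - 1) answer =
      answer ++ gg idx ((ball.drop a).take (b - a)) := by
  intro k
  induction k with
  | zero =>
    intro a b answer hab hb
    have hba : b = a := by omega
    subst hba
    rw [altLoop, dif_neg (by omega)]
    simp [gg]
  | succ k ih =>
    intro a b answer hab hb
    have ha : a < ball.length := by omega
    have hb1 : b - 1 < ball.length := by omega
    have hcast : ((b : Int) - 1) = ((b - 1 : Nat) : Int) := by omega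
    have hbl : PySem.List.pyGetD ball (a : Int) 0 = ball[a] := by
      rw [PySem.List.pyGetD_natCast, List.getD_eq_getElem ball 0 ha]
    have hbr : PySem.List.pyGetD ball ((b : Int) - 1) 0 = ball[b - 1] := by
      rw [hcast, PySem.List.pyGetD_natCast, List.getD_eq_getElem ball 0 hb1]
    set w := (ball.drop a).take (b - a) with hwdef
    have hwcons : w = ball[a] :: (ball.drop (a + 1)).take (b - (a + 1)) := by
      rw [hwdef, show b - a = (b - (a + 1)) + 1 by omega, List.drop_eq_getElem_cons ha,
        List.take_succ_cons]
    have hwne : w ≠ [] := by rw [hwcons]; simp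
    have hwsplit : w = (ball.drop a).take (b - 1 - a) ++ [ball[b - 1]] := by
      rw [hwdef, show b - a = (b - 1 - a) + 1 by omega, List.take_add_one]
      congr 1
      rw [List.getElem?_drop, show a + (b - 1 - a) = b - 1 by omega,
        List.getElem?_eq_getElem hb1]
      rfl
    have hwlast : w.getLast hwne = ball[b - 1] := by
      rw [getLast_congr' _ _ hwne (by simp) hwsplit]
      simp
    have hwdl : w.dropLast = (ball.drop a).take (b - 1 - a) := by
      rw [hwsplit]
      simp
    rw [altLoop, dif_pos (by omega)]
    simp only [hbl, hbr]
    have hgw : gg idx w = gg idx (ball[a] :: (ball.drop (a + 1)).take (b - (a + 1))) := by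
      rw [← hwcons]
    have hglast : (ball[a] :: (ball.drop (a + 1)).take (b - (a + 1))).getLast (by simp)
        = ball[b - 1] := by
      rw [getLast_congr' _ w (by simp) hwne hwcons.symm]
      exact hwlast
    rw [hgw, gg, hglast]
    split_ifs with hle
    · have hcast2 : ((a : Int) + 1) = ((a + 1 : Nat) : Int) := by omega
      rw [hcast2, ih (a + 1) b _ (by omega) hb]
      simp
    · have hcast3 : ((b : Int) - 1 - 1) = ((b - 1 : Nat) : Int) - 1 := by omega
      rw [hcast3, ih a (b - 1) _ (by omega) (by omega)]
      have hdl2 : (ball.drop a).take (b - 1 - a) =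
          (ball[a] :: (ball.drop (a + 1)).take (b - (a + 1))).dropLast := by
        rw [← hwcons, hwdl]
      rw [hdl2]
      simp

-- ===== VERDICT (by name: the statement is the Claim_ definition above) =====
theorem solution_spec : Claim_equal_solution := by
  intro ball order _ hpre
  unfold Spec_solution solution solution_alt
  rcases hpre with ⟨hnd, hmem⟩
  rw [loop_eq_ff ball order [] [] (by simp)]
  have h1 : ff ball order = gg (buildIdx order) ball := by
    apply ff_eq_gg _ _ _ hnd hmem
    intro x hx y hy
    rw [buildIdx_getD order x (hmem x hx), buildIdx_getD order y (hmem y hy)]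
    exact ⟨fun h => by exact_mod_cast h, fun h => by exact_mod_cast h⟩
  have h2 := altLoop_eq ball (buildIdx order) ball.length 0 ball.length []
    (by omega) (by omega)
  simp only [Nat.cast_zero, List.drop_zero, List.take_length, Nat.sub_zero] at h2
  simp [PySem.List.len_eq, h2, h1]
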